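-- pv_equiv track=rewrite | github.com/schiob/TestingSistemas | ago-dic-2021/briones-esquivel-patricia-isabel/parcial1/taquitos.py | cuenta
-- ===== SOURCE A (Python) =====
-- def cuenta(pedido):
--     lista_taco = pedido.split()
--     menu = ['cachete', 'lengua', 'tripitas', 'pastor', 'machito']
--     costo = [13,10,9,15,14]
--     cuenta_total = 0
--     if (len(lista_taco) > 30 or len(lista_taco) < 1):
--         return 'Por favor, ingrese un pedido mayor a 0 y menor a 30.'
--     else:
--         for t in lista_taco:
--             if t == menu[0]:
--                 cuenta_total += costo[0]
--             elif t == menu[1]: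
--                 cuenta_total += costo[1]
--             elif t == menu[2]:
--                 cuenta_total += costo[2]
--             elif t == menu[3]:
--                 cuenta_total += costo[3]
--             elif t == menu[4]:
--                 cuenta_total += costo[4]
--     return (f'Total a pagar: {cuenta_total}')
-- ===== SOURCE B (Python) =====
-- def cuenta(pedido):
--     lista_taco = pedido.split()
--     if len(lista_taco) > 30 or len(lista_taco) < 1:
--         return 'Por favor, ingrese un pedido mayor a 0 y menor a 30.'
--     conteo = {}
--     for t in lista_taco:
--         conteo[t] = conteo.get(t, 0) + 1
--     precios = [('cachete', 13), ('lengua', 10), ('tripitas', 9), ('pastor', 15), ('machito', 14)]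
--     cuenta_total = 0
--     for item, n in precios:
--         cuenta_total += n * conteo.get(item, 0)
--     return f'Total a pagar: {cuenta_total}'
-- ===== Notes on version B (the rewrite author's own statement) =====
-- stated objective: alternative
-- what changed: B replaces A's per-token five-way if/elif chain with a frequency dict built in one counting pass, then sums price*count over the fixed five-entry menu.
import Mathlib
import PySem

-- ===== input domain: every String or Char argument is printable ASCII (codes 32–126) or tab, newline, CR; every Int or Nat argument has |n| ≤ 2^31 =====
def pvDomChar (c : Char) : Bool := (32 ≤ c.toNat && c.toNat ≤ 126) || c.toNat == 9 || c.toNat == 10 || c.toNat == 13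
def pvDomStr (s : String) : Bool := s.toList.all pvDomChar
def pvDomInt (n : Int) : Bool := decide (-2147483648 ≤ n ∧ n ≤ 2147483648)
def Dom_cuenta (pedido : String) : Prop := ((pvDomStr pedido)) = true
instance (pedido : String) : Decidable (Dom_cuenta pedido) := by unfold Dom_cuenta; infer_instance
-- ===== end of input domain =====

-- B builds a frequency dict of the tokens and sums price*count over the menu, instead of A's per-token if/elif chain; same return value.
-- ===== PORT A =====
def cuentaStep (acc : Int) (t : String) : Int :=
  if t == "cachete" then acc + 13
  else if t == "lengua" then acc + 10
  else if t == "tripitas" then acc + 9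
  else if t == "pastor" then acc + 15
  else if t == "machito" then acc + 14
  else acc

def cuenta (pedido : String) : String :=
  let lista_taco := PySem.Str.split₀ pedido
  if lista_taco.length > 30 ∨ lista_taco.length < 1 then
    "Por favor, ingrese un pedido mayor a 0 y menor a 30."
  else
    "Total a pagar: " ++ PySem.Int.toStr (lista_taco.foldl cuentaStep 0)

-- ===== PORT B =====
def cuenta_alt (pedido : String) : String :=
  let lista_taco := PySem.Str.split₀ pedido
  if lista_taco.length > 30 ∨ lista_taco.length < 1 then
    "Por favor, ingrese un pedido mayor a 0 y menor a 30."
  else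
    let conteo := lista_taco.foldl (fun d t => d.modify t 0 (· + 1)) (PySem.Dict.empty : PySem.Dict String Int)
    let precios : List (String × Int) :=
      [("cachete", 13), ("lengua", 10), ("tripitas", 9), ("pastor", 15), ("machito", 14)]
    let total := precios.foldl (fun acc p => acc + p.2 * conteo.getD p.1 0) 0
    "Total a pagar: " ++ PySem.Int.toStr total

-- ===== PRECONDITION & SPEC =====
def Spec_cuenta (pedido : String) (out : String) : Prop := out = cuenta_alt pedido
instance (pedido : String) (out : String) : Decidable (Spec_cuenta pedido out) := by unfold Spec_cuenta; infer_instance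

-- ===== CLAIM (what is proved, stated in full; the proofs are below) =====
def Claim_equal_cuenta : Prop := ∀ (pedido : String), Dom_cuenta pedido → Spec_cuenta pedido (cuenta pedido)

-- ===== LEMMAS AND PROOFS =====
lemma cuenta_loopA (ts : List String) (c : Int) :
    ts.foldl cuentaStep c =
      c + 13 * (ts.count "cachete" : Int) + 10 * (ts.count "lengua" : Int)
        + 9 * (ts.count "tripitas" : Int) + 15 * (ts.count "pastor" : Int)
        + 14 * (ts.count "machito" : Int) := by
  induction ts generalizing c with
  | nil => simp
  | cons t ts ih =>
    simp only [List.foldl_cons, ih, List.count_cons, cuentaStep]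
    by_cases h1 : t = "cachete" <;> by_cases h2 : t = "lengua" <;>
      by_cases h3 : t = "tripitas" <;> by_cases h4 : t = "pastor" <;>
      by_cases h5 : t = "machito" <;>
      simp_all <;> ring

-- ===== VERDICT (by name: the statement is the Claim_ definition above) =====
theorem cuenta_spec : Claim_equal_cuenta := by
  intro pedido _
  unfold Spec_cuenta cuenta cuenta_alt
  simp only []
  split
  · rfl
  · congr 1
    simp [List.foldl, PySem.Dict.getD_foldl_modify_add_one, PySem.Dict.getD_empty,
      cuenta_loopA]
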